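-- pv_equiv track=rewrite | github.com/swaroop-nath/Semantic-Web-Parser | API/second_phase_filtration.py | find_tag_type
-- ===== SOURCE A (Python) =====
-- FLAG_HEADER = 'header'
--
-- FLAG_PARA = 'paragraph'
--
-- FLAG_FORMATTING = 'formatting'
--
-- FLAG_SPAN = 'span'
--
-- FLAG_IMG = 'img'
--
-- FLAG_TABLE = 'table'
--
-- FLAG_SUP = 'sup'
--
-- FLAG_A = 'a'
--
-- FLAG_TABLE_ELEMENT = 'table_element'
--
-- header_tags = ['h1', 'h2', 'h3', 'h4', 'h5', 'h6']
--
-- formatting_tags = ['i', 'b', 'u', 'em', 'small', 'strike', 'strong']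
--
-- def find_tag_type(name):
--     name = name.strip()
--     for header in header_tags:
--         if header == name: return FLAG_HEADER
--     if name == 'span': return FLAG_SPAN
--     if name == 'p': return FLAG_PARA
--     for format_tag in formatting_tags:
--         if name == format_tag: return FLAG_FORMATTING
--     if name == 'img': return FLAG_IMG
--     if 'table' == name or 'tbody' == name: return FLAG_TABLE
--     if name == 'sup': return FLAG_SUP
--     if name == 'a': return FLAG_A
--     if name == 'td' or name == 'tr' or name == 'th': return FLAG_TABLE_ELEMENT
-- ===== SOURCE B (Python) =====
-- FLAG_HEADER = 'header'
-- FLAG_PARA = 'paragraph'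
-- FLAG_FORMATTING = 'formatting'
-- FLAG_SPAN = 'span'
-- FLAG_IMG = 'img'
-- FLAG_TABLE = 'table'
-- FLAG_SUP = 'sup'
-- FLAG_A = 'a'
-- FLAG_TABLE_ELEMENT = 'table_element'
--
-- FORMATTING_TAGS = frozenset(('i', 'b', 'u', 'em', 'small', 'strike', 'strong'))
-- # tags whose flag constant is the tag name itself
-- SELF_NAMED = frozenset(('span', 'img', 'sup', 'a', 'table'))
--
-- def find_tag_type(name):
--     t = name.strip()
--     # headers and table cells are recognised by their character pattern,
--     # not by a per-tag table
--     if len(t) == 2 and t[0] == 'h' and t[1] in '123456':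
--         return FLAG_HEADER
--     if len(t) == 2 and t[0] == 't' and t[1] in 'drh':
--         return FLAG_TABLE_ELEMENT
--     if t in FORMATTING_TAGS:
--         return FLAG_FORMATTING
--     if t == 'tbody':
--         return FLAG_TABLE
--     if t == 'p':
--         return FLAG_PARA
--     if t in SELF_NAMED:
--         return t
--     return None
-- ===== Notes on version B (the rewrite author's own statement) =====
-- stated objective: alternative
-- what changed: B classifies by the string's structure instead of tables/branch chains: headers and table cells are matched by a character pattern (len 2, 'h'+digit 1-6 / 't'+one of d,r,h), self-named tags (span, img, sup, a, table) are returned as the input string itself, leaving only a formatting set and two special cases.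
import Mathlib
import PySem

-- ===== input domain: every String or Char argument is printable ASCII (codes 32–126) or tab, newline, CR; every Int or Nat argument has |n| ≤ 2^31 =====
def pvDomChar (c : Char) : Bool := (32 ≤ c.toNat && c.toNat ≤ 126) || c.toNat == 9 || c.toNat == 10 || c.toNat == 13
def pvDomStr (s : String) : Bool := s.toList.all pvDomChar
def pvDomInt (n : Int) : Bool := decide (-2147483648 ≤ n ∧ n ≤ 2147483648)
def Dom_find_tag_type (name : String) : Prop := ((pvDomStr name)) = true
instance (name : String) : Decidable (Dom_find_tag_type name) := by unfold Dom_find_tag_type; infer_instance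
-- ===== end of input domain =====

-- B classifies by the string's structure (character patterns for headers/table cells,
-- self-named tags returned as the input itself) instead of A's tag-list scans and branch chain.

-- ===== PORT A =====
def header_tags : List String := ["h1", "h2", "h3", "h4", "h5", "h6"]

def formatting_tags : List String := ["i", "b", "u", "em", "small", "strike", "strong"]

def find_tag_type (name : String) : Option String :=
  let name := PySem.Str.strip name
  match header_tags.find? (fun header => header == name) with
  | some _ => some "header"
  | none =>
    if name == "span" then some "span"
    else if name == "p" then some "paragraph"
    else match formatting_tags.find? (fun format_tag => name == format_tag) with
    | some _ => some "formatting"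
    | none =>
      if name == "img" then some "img"
      else if "table" == name || "tbody" == name then some "table"
      else if name == "sup" then some "sup"
      else if name == "a" then some "a"
      else if name == "td" || name == "tr" || name == "th" then some "table_element"
      else none

-- ===== PORT B =====
def FORMATTING_TAGS : PySem.Set String := PySem.Set.ofList ["i", "b", "u", "em", "small", "strike", "strong"]

-- tags whose flag constant is the tag name itself
def SELF_NAMED : PySem.Set String := PySem.Set.ofList ["span", "img", "sup", "a", "table"]

-- `t[0]` / `t[1]` are evaluated only under the `len(t) == 2` guard, so `List.getD`
-- is exact for Python's in-range indexing; `t[1] in '123456'` is one-character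
-- substring membership, exact as membership in the character list.
def find_tag_type_alt (name : String) : Option String :=
  let t := PySem.Str.strip name
  let cs := t.toList
  if cs.length = 2 ∧ cs.getD 0 ' ' = 'h' ∧ cs.getD 1 ' ' ∈ "123456".toList then some "header"
  else if cs.length = 2 ∧ cs.getD 0 ' ' = 't' ∧ cs.getD 1 ' ' ∈ "drh".toList then some "table_element"
  else if t ∈ FORMATTING_TAGS then some "formatting"
  else if t = "tbody" then some "table"
  else if t = "p" then some "paragraph"
  else if t ∈ SELF_NAMED then some t
  else none

-- ===== PRECONDITION & SPEC =====
def Spec_find_tag_type (name : String) (out : Option String) : Prop := out = find_tag_type_alt name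
instance (name : String) (out : Option String) : Decidable (Spec_find_tag_type name out) := by unfold Spec_find_tag_type; infer_instance

-- ===== CLAIM =====
def Claim_equal_find_tag_type : Prop := ∀ (name : String), Dom_find_tag_type name → Spec_find_tag_type name (find_tag_type name)

-- ===== LEMMAS AND PROOFS =====
-- the two character patterns hold exactly on the corresponding literal tags
theorem pat_h (t : String)
    (h : t.toList.length = 2 ∧ t.toList.getD 0 ' ' = 'h' ∧ t.toList.getD 1 ' ' ∈ "123456".toList) :
    t = "h1" ∨ t = "h2" ∨ t = "h3" ∨ t = "h4" ∨ t = "h5" ∨ t = "h6" := by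
  obtain ⟨hl, h0, h1⟩ := h
  obtain ⟨a, b, hab⟩ := List.length_eq_two.mp hl
  rw [hab] at h0 h1
  simp only [List.getD] at h0 h1
  subst h0
  have h1' : b = '1' ∨ b = '2' ∨ b = '3' ∨ b = '4' ∨ b = '5' ∨ b = '6' := by
    simpa using h1
  rcases h1' with hb | hb | hb | hb | hb | hb <;> subst hb <;>
    [left; (right;left); (right;right;left); (right;right;right;left);
     (right;right;right;right;left); (right;right;right;right;right)] <;>
    exact String.toList_inj.mp (by rw [hab]; decide)

theorem pat_t (t : String)
    (h : t.toList.length = 2 ∧ t.toList.getD 0 ' ' = 't' ∧ t.toList.getD 1 ' ' ∈ "drh".toList) :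
    t = "td" ∨ t = "tr" ∨ t = "th" := by
  obtain ⟨hl, h0, h1⟩ := h
  obtain ⟨a, b, hab⟩ := List.length_eq_two.mp hl
  rw [hab] at h0 h1
  simp only [List.getD] at h0 h1
  subst h0
  have h1' : b = 'd' ∨ b = 'r' ∨ b = 'h' := by simpa using h1
  rcases h1' with hb | hb | hb <;> subst hb <;> [left; (right;left); (right;right)] <;>
    exact String.toList_inj.mp (by rw [hab]; decide)

theorem body_eq (t : String) :
    (match header_tags.find? (fun header => header == t) with
     | some _ => some "header"
     | none =>
       if t == "span" then some "span"
       else if t == "p" then some "paragraph"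
       else match formatting_tags.find? (fun format_tag => t == format_tag) with
       | some _ => some "formatting"
       | none =>
         if t == "img" then some "img"
         else if "table" == t || "tbody" == t then some "table"
         else if t == "sup" then some "sup"
         else if t == "a" then some "a"
         else if t == "td" || t == "tr" || t == "th" then some "table_element"
         else none) =
    (let cs := t.toList
     if cs.length = 2 ∧ cs.getD 0 ' ' = 'h' ∧ cs.getD 1 ' ' ∈ "123456".toList then some "header"
     else if cs.length = 2 ∧ cs.getD 0 ' ' = 't' ∧ cs.getD 1 ' ' ∈ "drh".toList then some "table_element"
     else if t ∈ FORMATTING_TAGS then some "formatting"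
     else if t = "tbody" then some "table"
     else if t = "p" then some "paragraph"
     else if t ∈ SELF_NAMED then some t
     else none) := by
  by_cases h : t ∈ ["h1", "h2", "h3", "h4", "h5", "h6", "span", "p", "i", "b", "u",
      "em", "small", "strike", "strong", "img", "table", "tbody", "sup", "a", "td", "tr", "th"]
  · fin_cases h <;> decide
  · simp only [List.mem_cons, List.not_mem_nil, or_false, not_or] at h
    obtain ⟨hn0, hn1, hn2, hn3, hn4, hn5, hn6, hn7, hn8, hn9, hn10, hn11, hn12, hn13, hn14,
      hn15, hn16, hn17, hn18, hn19, hn20, hn21, hn22⟩ := h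
    have hp1 : ¬ (t.toList.length = 2 ∧ t.toList.getD 0 ' ' = 'h' ∧ t.toList.getD 1 ' ' ∈ "123456".toList) := by
      intro hc
      rcases pat_h t hc with h' | h' | h' | h' | h' | h' <;> simp_all
    have hp2 : ¬ (t.toList.length = 2 ∧ t.toList.getD 0 ' ' = 't' ∧ t.toList.getD 1 ' ' ∈ "drh".toList) := by
      intro hc
      rcases pat_t t hc with h' | h' | h' <;> simp_all
    have g0 : ("h1" == t) = false := beq_eq_false_iff_ne.mpr (Ne.symm hn0)
    have g1 : ("h2" == t) = false := beq_eq_false_iff_ne.mpr (Ne.symm hn1)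
    have g2 : ("h3" == t) = false := beq_eq_false_iff_ne.mpr (Ne.symm hn2)
    have g3 : ("h4" == t) = false := beq_eq_false_iff_ne.mpr (Ne.symm hn3)
    have g4 : ("h5" == t) = false := beq_eq_false_iff_ne.mpr (Ne.symm hn4)
    have g5 : ("h6" == t) = false := beq_eq_false_iff_ne.mpr (Ne.symm hn5)
    have f6 : (t == "span") = false := beq_eq_false_iff_ne.mpr hn6
    have f7 : (t == "p") = false := beq_eq_false_iff_ne.mpr hn7
    have f8 : (t == "i") = false := beq_eq_false_iff_ne.mpr hn8
    have f9 : (t == "b") = false := beq_eq_false_iff_ne.mpr hn9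
    have f10 : (t == "u") = false := beq_eq_false_iff_ne.mpr hn10
    have f11 : (t == "em") = false := beq_eq_false_iff_ne.mpr hn11
    have f12 : (t == "small") = false := beq_eq_false_iff_ne.mpr hn12
    have f13 : (t == "strike") = false := beq_eq_false_iff_ne.mpr hn13
    have f14 : (t == "strong") = false := beq_eq_false_iff_ne.mpr hn14
    have f15 : (t == "img") = false := beq_eq_false_iff_ne.mpr hn15
    have g16 : ("table" == t) = false := beq_eq_false_iff_ne.mpr (Ne.symm hn16)
    have g17 : ("tbody" == t) = false := beq_eq_false_iff_ne.mpr (Ne.symm hn17)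
    have f18 : (t == "sup") = false := beq_eq_false_iff_ne.mpr hn18
    have f19 : (t == "a") = false := beq_eq_false_iff_ne.mpr hn19
    have f20 : (t == "td") = false := beq_eq_false_iff_ne.mpr hn20
    have f21 : (t == "tr") = false := beq_eq_false_iff_ne.mpr hn21
    have f22 : (t == "th") = false := beq_eq_false_iff_ne.mpr hn22
    simp only [header_tags, formatting_tags, FORMATTING_TAGS, SELF_NAMED, List.find?,
      g0, g1, g2, g3, g4, g5, f6, f7, f8, f9, f10, f11, f12, f13, f14, f15,
      g16, g17, f18, f19, f20, f21, f22, hp1, hp2, if_false, Bool.false_eq_true,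
      Bool.or_self, if_neg]
    simp [PySem.Set.ofList, hn6, hn7, hn8, hn9, hn10, hn11, hn12, hn13, hn14,
      hn15, hn16, hn17, hn18, hn19]

-- ===== VERDICT =====
theorem find_tag_type_spec : Claim_equal_find_tag_type := by
  intro name _
  unfold Spec_find_tag_type find_tag_type find_tag_type_alt
  exact body_eq (PySem.Str.strip name)
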